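-- pv_equiv track=rewrite | github.com/18F/pulse | data/processing.py | total_crypto_report
-- ===== SOURCE A (Python) =====
-- def total_crypto_report(eligible):
--   total_report = {
--     'eligible': len(eligible),
--     'bod_crypto': 0,
--     'rc4': 0,
--     '3des': 0,
--     'sslv2': 0,
--     'sslv3': 0
--   }
--
--   for report in eligible:
--     if report.get('bod_crypto') is None:
--       continue
--
--     # Needs to be a Yes
--     if report['bod_crypto'] == 1:
--       total_report['bod_crypto'] += 1
--
--     # Tracking separately, may not display separately
--     if report['rc4']:
--       total_report['rc4'] += 1
--     if report['3des']:
--       total_report['3des'] += 1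
--     if report['sslv2']:
--       total_report['sslv2'] += 1
--     if report['sslv3']:
--       total_report['sslv3'] += 1
--
--   return total_report
-- ===== SOURCE B (Python) =====
-- def total_crypto_report(eligible):
--   considered = [r for r in eligible if r.get('bod_crypto') is not None]
--   return {
--     'eligible': len(eligible),
--     'bod_crypto': sum(1 for r in considered if r['bod_crypto'] == 1),
--     'rc4': sum(1 for r in considered if r['rc4']),
--     '3des': sum(1 for r in considered if r['3des']),
--     'sslv2': sum(1 for r in considered if r['sslv2']),
--     'sslv3': sum(1 for r in considered if r['sslv3']),
--   }
-- ===== Notes on version B (the rewrite author's own statement) =====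
-- stated objective: alternative
-- what changed: Replaces the single accumulator loop mutating a six-key counter dict with a filter of the considered reports plus five independent counting passes building the result dict in one expression.
import Mathlib
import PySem

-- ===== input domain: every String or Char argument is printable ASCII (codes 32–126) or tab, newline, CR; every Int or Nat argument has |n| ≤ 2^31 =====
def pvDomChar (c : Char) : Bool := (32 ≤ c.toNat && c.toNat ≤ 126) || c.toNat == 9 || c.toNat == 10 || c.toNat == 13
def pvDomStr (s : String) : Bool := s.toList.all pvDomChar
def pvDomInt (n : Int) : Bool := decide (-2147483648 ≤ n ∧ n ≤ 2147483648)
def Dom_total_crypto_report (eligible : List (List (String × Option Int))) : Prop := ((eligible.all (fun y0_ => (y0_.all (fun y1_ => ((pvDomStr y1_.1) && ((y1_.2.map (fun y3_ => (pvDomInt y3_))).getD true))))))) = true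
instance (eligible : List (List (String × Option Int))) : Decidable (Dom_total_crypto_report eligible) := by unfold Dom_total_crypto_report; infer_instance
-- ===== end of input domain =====

-- B replaces A's single six-branch accumulator loop by a filter plus five independent counting passes (alternative decomposition, same cost).

-- ===== PORT A =====
-- report.get(k): first-match lookup in the report assoc list, flattened (missing key and stored None both give none)
def pvGet (r : List (String × Option Int)) (k : String) : Option Int :=
  ((PySem.Dict.mk r).get? k).join

-- Python truthiness of report[k] (assuming the key is present; a missing key is a KeyError, excluded by Pre_)
def pvTruthy (r : List (String × Option Int)) (k : String) : Bool :=
  match (PySem.Dict.mk r).get? k with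
  | some (some v) => v ≠ 0
  | _ => false

def pvStepA (d : PySem.Dict String Int) (r : List (String × Option Int)) : PySem.Dict String Int :=
  match pvGet r "bod_crypto" with
  | none => d
  | some v =>
    let d := if v = 1 then d.modify "bod_crypto" 0 (· + 1) else d
    let d := if pvTruthy r "rc4" then d.modify "rc4" 0 (· + 1) else d
    let d := if pvTruthy r "3des" then d.modify "3des" 0 (· + 1) else d
    let d := if pvTruthy r "sslv2" then d.modify "sslv2" 0 (· + 1) else d
    if pvTruthy r "sslv3" then d.modify "sslv3" 0 (· + 1) else d

def total_crypto_report (eligible : List (List (String × Option Int))) : List (String × Int) :=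
  (eligible.foldl pvStepA
    (PySem.Dict.mk [("eligible", (eligible.length : Int)), ("bod_crypto", 0), ("rc4", 0),
                    ("3des", 0), ("sslv2", 0), ("sslv3", 0)])).items

-- ===== PORT B =====
def total_crypto_report_alt (eligible : List (List (String × Option Int))) : List (String × Int) :=
  let considered := eligible.filter (fun r => (pvGet r "bod_crypto").isSome)
  [("eligible", (eligible.length : Int)),
   ("bod_crypto", (considered.countP (fun r => pvGet r "bod_crypto" = some 1) : Int)),
   ("rc4", (considered.countP (fun r => pvTruthy r "rc4") : Int)),
   ("3des", (considered.countP (fun r => pvTruthy r "3des") : Int)),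
   ("sslv2", (considered.countP (fun r => pvTruthy r "sslv2") : Int)),
   ("sslv3", (considered.countP (fun r => pvTruthy r "sslv3") : Int))]

-- ===== PRECONDITION & SPEC =====
-- Pre_ excludes exactly the reports where 'bod_crypto' is present and non-None but one of the
-- four protocol keys is missing: there Python's report['rc4'] etc. raises KeyError (in both A and B).
def Pre_total_crypto_report (eligible : List (List (String × Option Int))) : Prop :=
  ∀ r ∈ eligible, (pvGet r "bod_crypto").isSome →
    ((PySem.Dict.mk r).contains "rc4" ∧ (PySem.Dict.mk r).contains "3des" ∧
     (PySem.Dict.mk r).contains "sslv2" ∧ (PySem.Dict.mk r).contains "sslv3")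
instance (eligible : List (List (String × Option Int))) : Decidable (Pre_total_crypto_report eligible) := by
  unfold Pre_total_crypto_report; infer_instance

def pvWitness_total_crypto_report : (List (List (String × Option Int))) :=
  [[("bod_crypto", some 1), ("rc4", some 0), ("3des", some 2), ("sslv2", none), ("sslv3", some 1)],
   [("bod_crypto", none)], []]

def Spec_total_crypto_report (eligible : List (List (String × Option Int))) (out : List (String × Int)) : Prop := out = total_crypto_report_alt eligible
instance (eligible : List (List (String × Option Int))) (out : List (String × Int)) : Decidable (Spec_total_crypto_report eligible out) := by unfold Spec_total_crypto_report; infer_instance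

-- ===== CLAIM (what is proved, stated in full; the proofs are below) =====
def Claim_equal_total_crypto_report : Prop := ∀ (eligible : List (List (String × Option Int))), Dom_total_crypto_report eligible → Pre_total_crypto_report eligible → Spec_total_crypto_report eligible (total_crypto_report eligible)

-- ===== LEMMAS AND PROOFS =====

-- the shape A's accumulator dict keeps throughout the loop
def pvMk (e b r t s2 s3 : Int) : PySem.Dict String Int :=
  PySem.Dict.mk [("eligible", e), ("bod_crypto", b), ("rc4", r), ("3des", t), ("sslv2", s2), ("sslv3", s3)]

lemma pvMod_bod (e b r t s2 s3 : Int) :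
    (pvMk e b r t s2 s3).modify "bod_crypto" 0 (· + 1) = pvMk e (b + 1) r t s2 s3 := by
  simp [pvMk, PySem.Dict.modify, PySem.Dict.insert, pysem]

lemma pvMod_rc4 (e b r t s2 s3 : Int) :
    (pvMk e b r t s2 s3).modify "rc4" 0 (· + 1) = pvMk e b (r + 1) t s2 s3 := by
  simp [pvMk, PySem.Dict.modify, PySem.Dict.insert, pysem]

lemma pvMod_3des (e b r t s2 s3 : Int) :
    (pvMk e b r t s2 s3).modify "3des" 0 (· + 1) = pvMk e b r (t + 1) s2 s3 := by
  simp [pvMk, PySem.Dict.modify, PySem.Dict.insert, pysem]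

lemma pvMod_sslv2 (e b r t s2 s3 : Int) :
    (pvMk e b r t s2 s3).modify "sslv2" 0 (· + 1) = pvMk e b r t (s2 + 1) s3 := by
  simp [pvMk, PySem.Dict.modify, PySem.Dict.insert, pysem]

lemma pvMod_sslv3 (e b r t s2 s3 : Int) :
    (pvMk e b r t s2 s3).modify "sslv3" 0 (· + 1) = pvMk e b r t s2 (s3 + 1) := by
  simp [pvMk, PySem.Dict.modify, PySem.Dict.insert, pysem]

lemma pvStepA_mk (rep : List (String × Option Int)) (e b r t s2 s3 : Int) :
    pvStepA (pvMk e b r t s2 s3) rep =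
      if (pvGet rep "bod_crypto").isSome then
        pvMk e (b + if pvGet rep "bod_crypto" = some 1 then 1 else 0)
          (r + if pvTruthy rep "rc4" then 1 else 0)
          (t + if pvTruthy rep "3des" then 1 else 0)
          (s2 + if pvTruthy rep "sslv2" then 1 else 0)
          (s3 + if pvTruthy rep "sslv3" then 1 else 0)
      else pvMk e b r t s2 s3 := by
  unfold pvStepA
  cases h : pvGet rep "bod_crypto" with
  | none => simp
  | some v =>
    simp only [Option.isSome_some, if_true, Option.some.injEq]
    by_cases h1 : v = 1 <;>
      by_cases h2 : pvTruthy rep "rc4" <;>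
      by_cases h3 : pvTruthy rep "3des" <;>
      by_cases h4 : pvTruthy rep "sslv2" <;>
      by_cases h5 : pvTruthy rep "sslv3" <;>
      simp [h1, h2, h3, h4, h5, pvMod_bod, pvMod_rc4, pvMod_3des, pvMod_sslv2, pvMod_sslv3]

lemma pvFoldA (l : List (List (String × Option Int))) (e b r t s2 s3 : Int) :
    l.foldl pvStepA (pvMk e b r t s2 s3) =
      pvMk e
        (b + ((l.filter (fun x => (pvGet x "bod_crypto").isSome)).countP (fun x => pvGet x "bod_crypto" = some 1) : Int))
        (r + ((l.filter (fun x => (pvGet x "bod_crypto").isSome)).countP (fun x => pvTruthy x "rc4") : Int))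
        (t + ((l.filter (fun x => (pvGet x "bod_crypto").isSome)).countP (fun x => pvTruthy x "3des") : Int))
        (s2 + ((l.filter (fun x => (pvGet x "bod_crypto").isSome)).countP (fun x => pvTruthy x "sslv2") : Int))
        (s3 + ((l.filter (fun x => (pvGet x "bod_crypto").isSome)).countP (fun x => pvTruthy x "sslv3") : Int)) := by
  induction l generalizing b r t s2 s3 with
  | nil => simp
  | cons x xs ih =>
    rw [List.foldl_cons, pvStepA_mk, List.filter_cons]
    by_cases hx : (pvGet x "bod_crypto").isSome
    · rw [if_pos hx, ih]
      simp only [hx, if_true, List.countP_cons, decide_eq_true_eq]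
      unfold pvMk
      push_cast
      refine congrArg PySem.Dict.mk ?_
      refine congrArg (fun z => _ :: z) ?_
      simp only [List.cons.injEq, Prod.mk.injEq, true_and]
      refine ⟨?_, ?_, ?_, ?_, ?_⟩ <;> split_ifs <;> (try simp only [and_true]) <;> omega
    · rw [if_neg hx, if_neg hx, ih]

-- ===== VERDICT (by name: the statement is the Claim_ definition above) =====
theorem total_crypto_report_spec : Claim_equal_total_crypto_report := by
  intro eligible _ _
  show total_crypto_report eligible = total_crypto_report_alt eligible
  unfold total_crypto_report total_crypto_report_alt
  rw [show (PySem.Dict.mk [("eligible", (eligible.length : Int)), ("bod_crypto", 0), ("rc4", 0),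
        ("3des", 0), ("sslv2", 0), ("sslv3", 0)]) = pvMk (eligible.length) 0 0 0 0 0 from rfl,
      pvFoldA]
  simp [pvMk]
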